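-- pv_equiv track=rewrite | github.com/aldiprem/order | database/data.py | determine_shape_for_db
-- ===== SOURCE A (Python) =====
-- def determine_shape_for_db(username, based_on):
--     """Determine username type based on rules (HARUS SAMA PERSIS dengan b.py)"""
--     if not based_on or not username:
--         return "OP"
--
--     username_lower = username.lower()
--
--     # PENTING: Hapus spasi dari based_on untuk perbandingan (sama seperti di b.py)
--     based_on_no_spaces = based_on.replace(' ', '')
--     based_on_lower = based_on_no_spaces.lower()
--
--     # 1. CEK OP (On Point) - tanpa perubahan (setelah spasi dihapus)
--     if username_lower == based_on_lower:
--         return "OP"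
--
--     # 2. CEK SCANON - penambahan 's' di akhir
--     if username_lower == based_on_lower + 's':
--         return "SCANON"
--
--     # 3. CEK SOP (Semi On Point) - double letters
--     if len(based_on_lower) < len(username_lower):
--         for i in range(len(based_on_lower)):
--             if (based_on_lower[:i+1] + based_on_lower[i] + based_on_lower[i+1:]) == username_lower:
--                 return "SOP"
--
--     # 4. CEK CANON - penggantian i ke l atau l ke i
--     if len(username_lower) == len(based_on_lower):
--         is_canon = True
--         diff_count = 0
--         for a, b in zip(username_lower, based_on_lower):
--             if a != b:
--                 # Cek apakah perbedaan adalah i↔l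
--                 if (a == 'i' and b == 'l') or (a == 'l' and b == 'i'):
--                     diff_count += 1
--                 else:
--                     is_canon = False
--                     break
--         if is_canon and diff_count > 0:
--             return "CANON"
--
--     # 5. CEK TAMPING (Tambah Pinggir)
--     if len(username_lower) == len(based_on_lower) + 1:
--         if username_lower.startswith(based_on_lower) or username_lower.endswith(based_on_lower):
--             return "TAMPING"
--
--     # 6. CEK TAMDAL (Tambah Dalam)
--     if len(username_lower) == len(based_on_lower) + 1:
--         for i in range(len(based_on_lower)):
--             if (username_lower.startswith(based_on_lower[:i]) and
--                 username_lower[i+1:].startswith(based_on_lower[i:])):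
--                 return "TAMDAL"
--
--     # 7. CEK GANHUR (Ganti Huruf)
--     if len(username_lower) == len(based_on_lower):
--         diff_count = 0
--         for a, b in zip(username_lower, based_on_lower):
--             if a != b:
--                 diff_count += 1
--         if diff_count == 1:
--             return "GANHUR"
--
--     # 8. CEK SWITCH (Perpindahan Huruf)
--     if len(username_lower) == len(based_on_lower):
--         for i in range(len(based_on_lower) - 1):
--             switched = based_on_lower[:i] + based_on_lower[i+1] + based_on_lower[i] + based_on_lower[i+2:]
--             if switched == username_lower:
--                 return "SWITCH"
--
--     # 9. CEK KURHUF (Kurang Huruf)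
--     if len(username_lower) == len(based_on_lower) - 1:
--         for i in range(len(based_on_lower)):
--             removed = based_on_lower[:i] + based_on_lower[i+1:]
--             if removed == username_lower:
--                 return "KURHUF"
--
--     return "OP"
-- ===== SOURCE B (Python) =====
-- def determine_shape_for_db(username, based_on):
--     """Classify edit type via one longest-common-prefix scan plus O(1) slice comparisons."""
--     if not based_on or not username:
--         return "OP"
--     u = username.lower()
--     b = based_on.replace(' ', '').lower()
--     n, m = len(u), len(b)
--     p = 0
--     while p < n and p < m and u[p] == b[p]:
--         p += 1
--     if p == n and p == m:
--         return "OP"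
--     if n == m + 1 and p == m and u[m] == 's':
--         return "SCANON"
--     if n == m + 1 and p >= 1 and u[p] == u[p - 1] and u[p + 1:] == b[p:]:
--         return "SOP"
--     if n == m and all(a == c or {a, c} == {'i', 'l'} for a, c in zip(u, b)):
--         return "CANON"
--     if n == m + 1 and (u.startswith(b) or u.endswith(b)):
--         return "TAMPING"
--     if n == m + 1 and p < m and u[p + 1:] == b[p:]:
--         return "TAMDAL"
--     if n == m and u[p + 1:] == b[p + 1:]:
--         return "GANHUR"
--     if n == m and p + 1 < n and u[p] == b[p + 1] and u[p + 1] == b[p] and u[p + 2:] == b[p + 2:]: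
--         return "SWITCH"
--     if n == m - 1 and u[p:] == b[p + 1:]:
--         return "KURHUF"
--     return "OP"
-- ===== Notes on version B (the rewrite author's own statement) =====
-- stated objective: faster
-- what changed: Replaces A's quadratic loops that rebuild a candidate string for every position (insertion, doubling, swap, deletion) by a single longest-common-prefix scan followed by constant-many slice comparisons at that mismatch point.
import Mathlib
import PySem

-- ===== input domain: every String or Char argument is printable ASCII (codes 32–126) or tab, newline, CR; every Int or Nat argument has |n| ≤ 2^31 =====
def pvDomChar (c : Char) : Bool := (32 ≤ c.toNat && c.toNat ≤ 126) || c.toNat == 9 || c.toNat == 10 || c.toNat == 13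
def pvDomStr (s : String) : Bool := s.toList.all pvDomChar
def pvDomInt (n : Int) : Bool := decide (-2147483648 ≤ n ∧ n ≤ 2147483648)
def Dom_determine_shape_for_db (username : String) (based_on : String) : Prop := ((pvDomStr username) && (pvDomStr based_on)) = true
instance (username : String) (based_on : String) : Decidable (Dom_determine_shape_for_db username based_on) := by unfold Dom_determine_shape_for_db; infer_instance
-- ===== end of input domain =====

-- B replaces A's quadratic candidate-string-rebuilding loops by one longest-common-prefix scan
-- plus O(1)-many slice comparisons; same return value everywhere.

-- ===== PORT A =====
-- Transliteration of Source A. All slice/index positions A uses are nonnegative and in range,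
-- so List.take / List.drop / List.getD are exact for Python's s[:i] / s[i:] / s[i] here;
-- the for-loops that return on a hit are ported as bounded existentials over the same range.
-- The CANON for-loop (with its break and its is_canon/diff_count state) is the recursion pvCanonLoopA.
def pvCanonLoopA : List (Char × Char) → Bool → Int → Bool × Int
  | [], ic, d => (ic, d)
  | (a, c) :: rest, ic, d =>
    if a ≠ c then
      if (a = 'i' ∧ c = 'l') ∨ (a = 'l' ∧ c = 'i') then pvCanonLoopA rest ic (d + 1)
      else (false, d)
    else pvCanonLoopA rest ic d

def pvCoreA (u b : List Char) : String :=
  if u = b then "OP"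
  else if u = b ++ ['s'] then "SCANON"
  else if b.length < u.length ∧ ∃ i < b.length, b.take (i+1) ++ b.getD i 'a' :: b.drop (i+1) = u then "SOP"
  else if u.length = b.length ∧ (pvCanonLoopA (u.zip b) true 0).1 = true ∧ (pvCanonLoopA (u.zip b) true 0).2 > 0 then "CANON"
  else if u.length = b.length + 1 ∧ (PySem.Chars.startswith u b || PySem.Chars.endswith u b) = true then "TAMPING"
  else if u.length = b.length + 1 ∧ ∃ i < b.length, (PySem.Chars.startswith u (b.take i) && PySem.Chars.startswith (u.drop (i+1)) (b.drop i)) = true then "TAMDAL"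
  else if u.length = b.length ∧ (u.zip b).foldl (fun d q => if q.1 ≠ q.2 then d + 1 else d) (0 : Int) = 1 then "GANHUR"
  else if u.length = b.length ∧ ∃ i < b.length - 1, b.take i ++ b.getD (i+1) 'a' :: b.getD i 'a' :: b.drop (i+2) = u then "SWITCH"
  else if (u.length : Int) = (b.length : Int) - 1 ∧ ∃ i < b.length, b.take i ++ b.drop (i+1) = u then "KURHUF"
  else "OP"

def determine_shape_for_db (username : String) (based_on : String) : String :=
  if based_on = "" ∨ username = "" then "OP"
  else pvCoreA (PySem.Chars.lower username.toList)
               (PySem.Chars.lower (PySem.Chars.replace based_on.toList [' '] []))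

-- ===== PORT B =====
-- Transliteration of Source B. The while-loop computing the longest-common-prefix length p is the
-- structural recursion pvLcp; every slice Source B takes is at a nonnegative in-range position, so
-- List.drop / List.getD are exact; {a,c}=={'i','l'} is the equivalent two-case test.
def pvLcp : List Char → List Char → Nat
  | a :: u, c :: b => if a = c then pvLcp u b + 1 else 0
  | _, _ => 0

def pvCoreB (u b : List Char) : String :=
  if pvLcp u b = u.length ∧ pvLcp u b = b.length then "OP"
  else if u.length = b.length + 1 ∧ pvLcp u b = b.length ∧ u.getD b.length 'a' = 's' then "SCANON"
  else if u.length = b.length + 1 ∧ 1 ≤ pvLcp u b ∧ u.getD (pvLcp u b) 'a' = u.getD (pvLcp u b - 1) 'a' ∧ u.drop (pvLcp u b + 1) = b.drop (pvLcp u b) then "SOP"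
  else if u.length = b.length ∧ (u.zip b).all (fun q => q.1 == q.2 || (q.1 == 'i' && q.2 == 'l') || (q.1 == 'l' && q.2 == 'i')) = true then "CANON"
  else if u.length = b.length + 1 ∧ (PySem.Chars.startswith u b || PySem.Chars.endswith u b) = true then "TAMPING"
  else if u.length = b.length + 1 ∧ pvLcp u b < b.length ∧ u.drop (pvLcp u b + 1) = b.drop (pvLcp u b) then "TAMDAL"
  else if u.length = b.length ∧ u.drop (pvLcp u b + 1) = b.drop (pvLcp u b + 1) then "GANHUR"
  else if u.length = b.length ∧ pvLcp u b + 1 < u.length ∧ u.getD (pvLcp u b) 'a' = b.getD (pvLcp u b + 1) 'a' ∧ u.getD (pvLcp u b + 1) 'a' = b.getD (pvLcp u b) 'a' ∧ u.drop (pvLcp u b + 2) = b.drop (pvLcp u b + 2) then "SWITCH"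
  else if (u.length : Int) = (b.length : Int) - 1 ∧ u.drop (pvLcp u b) = b.drop (pvLcp u b + 1) then "KURHUF"
  else "OP"

def determine_shape_for_db_alt (username : String) (based_on : String) : String :=
  if based_on = "" ∨ username = "" then "OP"
  else pvCoreB (PySem.Chars.lower username.toList)
               (PySem.Chars.lower (PySem.Chars.replace based_on.toList [' '] []))

-- ===== PRECONDITION & SPEC =====
def Spec_determine_shape_for_db (username : String) (based_on : String) (out : String) : Prop := out = determine_shape_for_db_alt username based_on
instance (username : String) (based_on : String) (out : String) : Decidable (Spec_determine_shape_for_db username based_on out) := by unfold Spec_determine_shape_for_db; infer_instance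

-- ===== CLAIM (what is proved, stated in full; the proofs are below) =====
def Claim_equal_determine_shape_for_db : Prop := ∀ (username : String) (based_on : String), Dom_determine_shape_for_db username based_on → Spec_determine_shape_for_db username based_on (determine_shape_for_db username based_on)

-- ===== LEMMAS AND PROOFS =====

theorem pvLcp_le_left (u b : List Char) : pvLcp u b ≤ u.length := by
  induction u generalizing b with
  | nil => simp [pvLcp]
  | cons a u ih =>
    cases b with
    | nil => simp [pvLcp]
    | cons c b => simp only [pvLcp]; split <;> simp [ih b]

theorem pvLcp_le_right (u b : List Char) : pvLcp u b ≤ b.length := by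
  induction u generalizing b with
  | nil => simp [pvLcp]
  | cons a u ih =>
    cases b with
    | nil => simp [pvLcp]
    | cons c b => simp only [pvLcp]; split <;> simp [ih b]

theorem pvLcp_agree (u b : List Char) : ∀ j < pvLcp u b, u[j]? = b[j]? := by
  induction u generalizing b with
  | nil => simp [pvLcp]
  | cons a u ih =>
    cases b with
    | nil => simp [pvLcp]
    | cons c b =>
      intro j hj
      simp only [pvLcp] at hj
      split at hj
      · cases j with
        | zero => simp_all
        | succ j => simpa using ih b j (by omega)
      · omega

theorem pvLcp_mismatch (u b : List Char) (h1 : pvLcp u b < u.length) (h2 : pvLcp u b < b.length) :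
    u[pvLcp u b]? ≠ b[pvLcp u b]? := by
  induction u generalizing b with
  | nil => simp at h1
  | cons a u ih =>
    cases b with
    | nil => simp at h2
    | cons c b =>
      rcases eq_or_ne a c with h | h
      · subst h
        simp only [pvLcp, if_true] at h1 h2 ⊢
        simp only [List.length_cons] at h1 h2
        simpa using ih b (by omega) (by omega)
      · simp only [pvLcp, if_neg h] at h1 h2 ⊢
        simpa using h

theorem le_pvLcp_of_agree (u b : List Char) (k : Nat) (hk : k ≤ u.length)
    (h : ∀ j < k, u[j]? = b[j]?) : k ≤ pvLcp u b := by
  induction u generalizing b k with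
  | nil => simp at hk; omega
  | cons a u ih =>
    cases k with
    | zero => omega
    | succ k =>
      cases b with
      | nil => have := h 0 (by omega); simp at this
      | cons c b =>
        have h0 := h 0 (by omega)
        simp at h0
        simp only [pvLcp, if_pos h0]
        have : k ≤ pvLcp u b := ih b k (by simpa using hk) (fun j hj => by simpa using h (j+1) (by omega))
        omega

theorem pv_drop_eq_iff (u b : List Char) (a c : Nat) :
    u.drop a = b.drop c ↔ ∀ k, u[a + k]? = b[c + k]? := by
  constructor
  · intro h k
    have := congrArg (fun l => l[k]?) h
    simpa [List.getElem?_drop] using this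
  · intro h
    apply List.ext_getElem?
    intro k
    simpa [List.getElem?_drop] using h k

theorem pv_eq_of_full (u b : List Char) (h1 : pvLcp u b = u.length) (h2 : pvLcp u b = b.length) :
    u = b := by
  apply List.ext_getElem?
  intro j
  by_cases hj : j < pvLcp u b
  · exact pvLcp_agree u b j hj
  · rw [List.getElem?_eq_none (by omega), List.getElem?_eq_none (by omega)]

theorem pv_take_agree (u b : List Char) (k : Nat) (h : ∀ j < k, u[j]? = b[j]?) :
    u.take k = b.take k := by
  apply List.ext_getElem?
  intro j
  rw [List.getElem?_take, List.getElem?_take]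
  split
  · exact h j (by omega)
  · rfl

theorem pv_getElem?_insertAfter (b : List Char) (i : Nat) (x : Char) (hi : i < b.length) (j : Nat) :
    (b.take (i+1) ++ x :: b.drop (i+1))[j]? =
      if j ≤ i then b[j]? else if j = i + 1 then some x else b[j-1]? := by
  rw [List.getElem?_append]
  rw [List.length_take]
  split_ifs with h1 h2 h3 <;> try omega
  · rw [List.getElem?_take]; rw [if_pos (by omega)]
  · rw [List.getElem?_cons, if_pos (by omega)]
  · rw [List.getElem?_cons, if_neg (by omega), List.getElem?_drop]
    congr 1
    omega

theorem pv_getElem?_swapAt (b : List Char) (i : Nat) (x y : Char) (hi : i + 1 < b.length) (j : Nat) :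
    (b.take i ++ x :: y :: b.drop (i+2))[j]? =
      if j < i then b[j]? else if j = i then some x else if j = i + 1 then some y else b[j]? := by
  rw [List.getElem?_append]
  rw [List.length_take]
  split_ifs with h1 h2 h3 h4 <;> try omega
  · rw [List.getElem?_take]; rw [if_pos (by omega)]
  · rw [List.getElem?_cons, if_pos (by omega)]
  · rw [List.getElem?_cons, if_neg (by omega), List.getElem?_cons, if_pos (by omega)]
  · rw [List.getElem?_cons, if_neg (by omega), List.getElem?_cons, if_neg (by omega), List.getElem?_drop]
    congr 1
    omega

theorem pv_getElem?_removeAt (b : List Char) (i : Nat) (hi : i ≤ b.length) (j : Nat) :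
    (b.take i ++ b.drop (i+1))[j]? = if j < i then b[j]? else b[j+1]? := by
  rw [List.getElem?_append]
  rw [List.length_take]
  split_ifs with h1 <;> try omega
  · rw [List.getElem?_take]; rw [if_pos (by omega)]
  · rw [List.getElem?_drop]
    congr 1
    omega

theorem pvLcp_self (u : List Char) : pvLcp u u = u.length := by
  induction u with
  | nil => simp [pvLcp]
  | cons a u ih => simp [pvLcp, ih]

theorem pv_getD_of_lt (u : List Char) (j : Nat) (d : Char) (h : j < u.length) :
    u[j]? = some (u.getD j d) := by
  rw [List.getD_eq_getElem?_getD, List.getElem?_eq_getElem h]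
  rfl

theorem pv_lt_of_ne (u b : List Char) (h : u.length = b.length) (hne : u ≠ b) :
    pvLcp u b < u.length := by
  by_contra h2
  have h3 : pvLcp u b = u.length := le_antisymm (pvLcp_le_left u b) (by omega)
  exact hne (pv_eq_of_full u b h3 (by rw [h3, h]))

theorem pv_e1 (u b : List Char) :
    u = b ↔ (pvLcp u b = u.length ∧ pvLcp u b = b.length) := by
  constructor
  · rintro rfl
    exact ⟨pvLcp_self u, pvLcp_self u⟩
  · rintro ⟨h1, h2⟩
    exact pv_eq_of_full u b h1 h2

theorem pv_e2 (u b : List Char) :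
    u = b ++ ['s'] ↔
      (u.length = b.length + 1 ∧ pvLcp u b = b.length ∧ u.getD b.length 'a' = 's') := by
  constructor
  · rintro rfl
    refine ⟨by simp, ?_, ?_⟩
    · refine le_antisymm (pvLcp_le_right _ _) (le_pvLcp_of_agree _ _ _ (by simp) ?_)
      intro j hj
      rw [List.getElem?_append, if_pos (by omega)]
    · have : (b ++ ['s'])[b.length]? = some 's' := by
        rw [List.getElem?_append, if_neg (by omega)]
        simp
      rw [pv_getD_of_lt _ b.length 'a' (by simp)] at this
      exact Option.some.inj this
  · rintro ⟨hn, hp, hgd⟩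
    apply List.ext_getElem?
    intro j
    rw [List.getElem?_append]
    rcases lt_trichotomy j b.length with hj | hj | hj
    · rw [if_pos hj]
      exact pvLcp_agree u b j (by omega)
    · subst hj
      rw [if_neg (by omega)]
      simp only [Nat.sub_self]
      rw [pv_getD_of_lt u b.length 'a' (by omega), hgd]
      simp
    · rw [if_neg (by omega), List.getElem?_eq_none (by omega), List.getElem?_eq_none (by simp; omega)]

theorem pv_e3 (u b : List Char) :
    (b.length < u.length ∧ ∃ i < b.length, b.take (i+1) ++ b.getD i 'a' :: b.drop (i+1) = u) ↔
    (u.length = b.length + 1 ∧ 1 ≤ pvLcp u b ∧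
      u.getD (pvLcp u b) 'a' = u.getD (pvLcp u b - 1) 'a' ∧
      u.drop (pvLcp u b + 1) = b.drop (pvLcp u b)) := by
  constructor
  · rintro ⟨hmn, i, him, heq⟩
    have hjs : ∀ j, u[j]? =
        (if j ≤ i then b[j]? else if j = i + 1 then some (b.getD i 'a') else b[j-1]?) := by
      intro j
      rw [← heq, pv_getElem?_insertAfter b i _ him j]
    have hn : u.length = b.length + 1 := by
      rw [← heq]
      simp
    have hshift : ∀ j, i + 1 ≤ j → u[j]? = b[j-1]? := by
      intro j hj
      rw [hjs j, if_neg (by omega)]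
      by_cases hj2 : j = i + 1
      · rw [if_pos hj2, hj2]
        simp only [Nat.add_sub_cancel]
        exact (pv_getD_of_lt b i 'a' him).symm
      · rw [if_neg hj2]
    have hip : i + 1 ≤ pvLcp u b :=
      le_pvLcp_of_agree u b (i+1) (by omega) (fun j hj => by rw [hjs j, if_pos (by omega)])
    have hpm : pvLcp u b ≤ b.length := pvLcp_le_right u b
    refine ⟨hn, by omega, ?_, ?_⟩
    · have h1 : u[pvLcp u b]? = b[pvLcp u b - 1]? := hshift _ (by omega)
      have h2 : u[pvLcp u b - 1]? = b[pvLcp u b - 1]? := pvLcp_agree u b _ (by omega)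
      have h3 : u[pvLcp u b]? = u[pvLcp u b - 1]? := h1.trans h2.symm
      rw [pv_getD_of_lt u _ 'a' (by omega), pv_getD_of_lt u (pvLcp u b - 1) 'a' (by omega)] at h3
      exact Option.some.inj h3
    · rw [pv_drop_eq_iff]
      intro k
      have h4 := hshift (pvLcp u b + 1 + k) (by omega)
      rw [show pvLcp u b + 1 + k - 1 = pvLcp u b + k by omega] at h4
      exact h4
  · rintro ⟨hn, hp1, hgd, hdrop⟩
    have hpm : pvLcp u b ≤ b.length := pvLcp_le_right u b
    have hpn : pvLcp u b < u.length := by omega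
    refine ⟨by omega, pvLcp u b - 1, by omega, ?_⟩
    apply List.ext_getElem?
    intro j
    rw [pv_getElem?_insertAfter b (pvLcp u b - 1) _ (by omega) j]
    have hgd2 : u.getD (pvLcp u b - 1) 'a' = b.getD (pvLcp u b - 1) 'a' := by
      have := pvLcp_agree u b (pvLcp u b - 1) (by omega)
      rw [pv_getD_of_lt u _ 'a' (by omega), pv_getD_of_lt b _ 'a' (by omega)] at this
      exact Option.some.inj this
    split_ifs with h1 h2
    · exact (pvLcp_agree u b j (by omega)).symm
    · rw [h2, show pvLcp u b - 1 + 1 = pvLcp u b by omega,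
        pv_getD_of_lt u (pvLcp u b) 'a' hpn, hgd, hgd2]
    · have h4 := (pv_drop_eq_iff u b (pvLcp u b + 1) (pvLcp u b)).mp hdrop (j - pvLcp u b - 1)
      rw [show pvLcp u b + 1 + (j - pvLcp u b - 1) = j by omega,
        show pvLcp u b + (j - pvLcp u b - 1) = j - 1 by omega] at h4
      exact h4.symm

theorem pv_canon_fst (l : List (Char × Char)) (d : Int) :
    (pvCanonLoopA l true d).1 =
      l.all (fun q => q.1 == q.2 || (q.1 == 'i' && q.2 == 'l') || (q.1 == 'l' && q.2 == 'i')) := by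
  induction l generalizing d with
  | nil => simp [pvCanonLoopA]
  | cons q l ih =>
    obtain ⟨a, c⟩ := q
    simp only [pvCanonLoopA]
    by_cases hac : a = c
    · subst hac
      simp [ih]
    · rw [if_pos (by exact hac)]
      by_cases hil : (a = 'i' ∧ c = 'l') ∨ (a = 'l' ∧ c = 'i')
      · rw [if_pos hil, ih]
        rcases hil with ⟨h1, h2⟩ | ⟨h1, h2⟩ <;> subst h1 <;> subst h2 <;> simp
      · rw [if_neg hil]
        push Not at hil
        simp only [List.all_cons]
        have : (a == c || (a == 'i' && c == 'l') || (a == 'l' && c == 'i')) = false := by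
          rcases hil with ⟨h1, h2⟩
          by_cases ha : a = 'i'
          · subst ha
            simp [hac, h1 rfl]
          · by_cases hb : a = 'l'
            · subst hb
              simp [hac, h2 rfl]
            · simp [hac, ha, hb]
        rw [this]
        simp

theorem pv_canon_snd (l : List (Char × Char)) (d : Int)
    (hall : l.all (fun q => q.1 == q.2 || (q.1 == 'i' && q.2 == 'l') || (q.1 == 'l' && q.2 == 'i')) = true) :
    (pvCanonLoopA l true d).2 = d + (l.countP (fun q => !(q.1 == q.2)) : Int) := by
  induction l generalizing d with
  | nil => simp [pvCanonLoopA]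
  | cons q l ih =>
    obtain ⟨a, c⟩ := q
    simp only [List.all_cons, Bool.and_eq_true] at hall
    obtain ⟨hq, hall⟩ := hall
    simp only [pvCanonLoopA, List.countP_cons]
    by_cases hac : a = c
    · subst hac
      rw [if_neg (by simp)]
      rw [ih _ hall]
      simp
    · rw [if_pos (by exact hac)]
      have hil : (a = 'i' ∧ c = 'l') ∨ (a = 'l' ∧ c = 'i') := by
        simp only [Bool.or_eq_true, beq_iff_eq, Bool.and_eq_true] at hq
        rcases hq with (h | h) | h
        · exact absurd h hac
        · exact Or.inl h
        · exact Or.inr h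
      have hb : (!(a == c)) = true := by simp [hac]
      rw [if_pos hil, ih _ hall, hb, if_pos rfl]
      push_cast
      ring

theorem pv_count_diag (l : List Char) : (l.zip l).countP (fun q => !(q.1 == q.2)) = 0 := by
  induction l with
  | nil => simp
  | cons a l ih => simp [ih]

theorem pv_zip_count_zero_iff (u b : List Char) (h : u.length = b.length) :
    (u.zip b).countP (fun q => !(q.1 == q.2)) = 0 ↔ u = b := by
  induction u generalizing b with
  | nil =>
    cases b with
    | nil => simp
    | cons c b => simp at h
  | cons a u ih =>
    cases b with
    | nil => simp at h
    | cons c b =>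
      simp only [List.zip_cons_cons, List.countP_cons]
      by_cases hac : a = c
      · subst hac
        simp only [List.length_cons, Nat.add_right_cancel_iff] at h
        simp [ih b h]
      · have : (!(a == c)) = true := by simp [hac]
        simp [this, hac]

theorem pv_count_split (u b : List Char) (h : u.length = b.length) (hne : u ≠ b) :
    (u.zip b).countP (fun q => !(q.1 == q.2)) = 1 ↔
      u.drop (pvLcp u b + 1) = b.drop (pvLcp u b + 1) := by
  set p := pvLcp u b with hp
  have hpn : p < u.length := pv_lt_of_ne u b h hne
  have hpm : p < b.length := by omega
  have htk : (u.take p).length = (b.take p).length := by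
    simp [List.length_take]
    omega
  have hzip : u.zip b = (u.take p).zip (b.take p) ++ (u.drop p).zip (b.drop p) := by
    conv_lhs => rw [← List.take_append_drop p u, ← List.take_append_drop p b]
    rw [List.zip_append htk]
  have htake : u.take p = b.take p :=
    pv_take_agree u b _ (fun j hj => pvLcp_agree u b j hj)
  have hmm : u[p] ≠ b[p] := by
    intro hc
    apply pvLcp_mismatch u b hpn hpm
    rw [List.getElem?_eq_getElem hpn, List.getElem?_eq_getElem hpm, hc]
  rw [hzip, List.countP_append, htake, pv_count_diag,
    List.drop_eq_getElem_cons hpn, List.drop_eq_getElem_cons hpm,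
    List.zip_cons_cons, List.countP_cons]
  have hb : (!(u[p] == b[p])) = true := by simp [hmm]
  rw [hb, if_pos rfl]
  rw [show (0 + (List.countP (fun q => !(q.1 == q.2)) ((u.drop (p + 1)).zip (b.drop (p + 1))) + 1) = 1) ↔ (List.countP (fun q => !(q.1 == q.2)) ((u.drop (p + 1)).zip (b.drop (p + 1))) = 0) from by omega]
  exact pv_zip_count_zero_iff _ _ (by simp; omega)

theorem pv_e4 (u b : List Char) (hne : u ≠ b) :
    (u.length = b.length ∧ (pvCanonLoopA (u.zip b) true 0).1 = true ∧
      (pvCanonLoopA (u.zip b) true 0).2 > 0) ↔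
    (u.length = b.length ∧
      (u.zip b).all (fun q => q.1 == q.2 || (q.1 == 'i' && q.2 == 'l') || (q.1 == 'l' && q.2 == 'i')) = true) := by
  constructor
  · rintro ⟨h, hc, -⟩
    rw [pv_canon_fst] at hc
    exact ⟨h, hc⟩
  · rintro ⟨h, hall⟩
    refine ⟨h, by rw [pv_canon_fst]; exact hall, ?_⟩
    rw [pv_canon_snd _ _ hall]
    have hcz : (u.zip b).countP (fun q => !(q.1 == q.2)) ≠ 0 := by
      intro hc
      exact hne ((pv_zip_count_zero_iff u b h).mp hc)
    omega

theorem pv_e7 (u b : List Char) (hne : u ≠ b) :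
    (u.length = b.length ∧
      (u.zip b).foldl (fun d q => if q.1 ≠ q.2 then d + 1 else d) (0 : Int) = 1) ↔
    (u.length = b.length ∧ u.drop (pvLcp u b + 1) = b.drop (pvLcp u b + 1)) := by
  have hfn : (fun (d : Int) (q : Char × Char) => if q.1 ≠ q.2 then d + 1 else d) =
      (fun (d : Int) (q : Char × Char) => if (!(q.1 == q.2)) = true then d + 1 else d) := by
    funext d q
    by_cases hq : q.1 = q.2 <;> simp [hq]
  rw [hfn, PySem.List.foldl_count_if]
  constructor
  · rintro ⟨h, hcnt⟩
    refine ⟨h, (pv_count_split u b h hne).mp (by omega)⟩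
  · rintro ⟨h, hdrop⟩
    have := (pv_count_split u b h hne).mpr hdrop
    exact ⟨h, by omega⟩

theorem pv_e6 (u b : List Char)
    (hT : ¬ (u.length = b.length + 1 ∧ (PySem.Chars.startswith u b || PySem.Chars.endswith u b) = true)) :
    (u.length = b.length + 1 ∧ ∃ i < b.length,
      (PySem.Chars.startswith u (b.take i) && PySem.Chars.startswith (u.drop (i+1)) (b.drop i)) = true) ↔
    (u.length = b.length + 1 ∧ pvLcp u b < b.length ∧
      u.drop (pvLcp u b + 1) = b.drop (pvLcp u b)) := by
  constructor
  · rintro ⟨hn, i, him, hsw⟩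
    rw [Bool.and_eq_true, PySem.Chars.startswith_iff, PySem.Chars.startswith_iff] at hsw
    obtain ⟨hpre1, hpre2⟩ := hsw
    have hagree : ∀ j < i, u[j]? = b[j]? := by
      intro j hj
      have h1 := (List.prefix_iff_getElem?.mp hpre1) j (by simp [List.length_take]; omega)
      rw [h1, List.getElem_take]
      exact (List.getElem?_eq_getElem (by omega)).symm
    have heqd : u.drop (i+1) = b.drop i :=
      (hpre2.eq_of_length (by simp; omega)).symm
    have hshift := (pv_drop_eq_iff u b (i+1) i).mp heqd
    have hip : i ≤ pvLcp u b := le_pvLcp_of_agree u b i (by omega) hagree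
    have hpm : pvLcp u b < b.length := by
      by_contra hc
      have hpb : pvLcp u b = b.length := le_antisymm (pvLcp_le_right u b) (by omega)
      apply hT
      refine ⟨hn, ?_⟩
      rw [Bool.or_eq_true]
      left
      rw [PySem.Chars.startswith_iff]
      have : u.take b.length = b := by
        rw [pv_take_agree u b b.length (fun j hj => pvLcp_agree u b j (by omega)),
          List.take_length]
      exact this ▸ List.take_prefix b.length u
    refine ⟨hn, hpm, ?_⟩
    rw [pv_drop_eq_iff]
    intro k
    have h2 := hshift (pvLcp u b - i + k)
    rw [show i + 1 + (pvLcp u b - i + k) = pvLcp u b + 1 + k by omega,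
      show i + (pvLcp u b - i + k) = pvLcp u b + k by omega] at h2
    exact h2
  · rintro ⟨hn, hpm, hdrop⟩
    refine ⟨hn, pvLcp u b, hpm, ?_⟩
    rw [Bool.and_eq_true, PySem.Chars.startswith_iff, PySem.Chars.startswith_iff]
    constructor
    · rw [← pv_take_agree u b _ (fun j hj => pvLcp_agree u b j hj)]
      exact List.take_prefix _ u
    · rw [← hdrop]

theorem pv_e8 (u b : List Char) (hne : u ≠ b) :
    (u.length = b.length ∧ ∃ i < b.length - 1,
      b.take i ++ b.getD (i+1) 'a' :: b.getD i 'a' :: b.drop (i+2) = u) ↔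
    (u.length = b.length ∧ pvLcp u b + 1 < u.length ∧
      u.getD (pvLcp u b) 'a' = b.getD (pvLcp u b + 1) 'a' ∧
      u.getD (pvLcp u b + 1) 'a' = b.getD (pvLcp u b) 'a' ∧
      u.drop (pvLcp u b + 2) = b.drop (pvLcp u b + 2)) := by
  constructor
  · rintro ⟨hnm, i, hi, heq⟩
    have hpn : pvLcp u b < u.length := pv_lt_of_ne u b hnm hne
    have hpm : pvLcp u b < b.length := by omega
    have hi1 : i + 1 < b.length := by omega
    have hjs : ∀ j, u[j]? = (if j < i then b[j]? else if j = i then some (b.getD (i+1) 'a')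
        else if j = i + 1 then some (b.getD i 'a') else b[j]?) := by
      intro j
      rw [← heq, pv_getElem?_swapAt b i _ _ hi1 j]
    have hip : i ≤ pvLcp u b :=
      le_pvLcp_of_agree u b i (by omega) (fun j hj => by rw [hjs j, if_pos hj])
    have hmm : u[pvLcp u b]? ≠ b[pvLcp u b]? := pvLcp_mismatch u b hpn hpm
    have hpi : pvLcp u b = i := by
      by_contra hc
      have hlt : i < pvLcp u b := by omega
      apply hmm
      have hbb : b[i]? = b[i+1]? := by
        have h1 : u[i]? = some (b.getD (i+1) 'a') := by
          rw [hjs i, if_neg (by omega), if_pos rfl]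
        have h2 : u[i]? = b[i]? := pvLcp_agree u b i hlt
        rw [h2] at h1
        rw [h1]
        exact (pv_getD_of_lt b (i+1) 'a' hi1).symm
      by_cases hp1 : pvLcp u b = i + 1
      · rw [hjs _, if_neg (by omega), if_neg (by omega), if_pos hp1, hp1, ← hbb,
          pv_getD_of_lt b i 'a' (by omega)]
      · rw [hjs _, if_neg (by omega), if_neg (by omega), if_neg hp1]
    subst hpi
    refine ⟨hnm, by omega, ?_, ?_, ?_⟩
    · have h1 : u[pvLcp u b]? = some (b.getD (pvLcp u b + 1) 'a') := by
        rw [hjs _, if_neg (by omega), if_pos rfl]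
      rw [pv_getD_of_lt u _ 'a' hpn] at h1
      exact Option.some.inj h1
    · have h1 : u[pvLcp u b + 1]? = some (b.getD (pvLcp u b) 'a') := by
        rw [hjs _, if_neg (by omega), if_neg (by omega), if_pos rfl]
      rw [pv_getD_of_lt u _ 'a' (by omega)] at h1
      exact Option.some.inj h1
    · rw [pv_drop_eq_iff]
      intro k
      rw [hjs _, if_neg (by omega), if_neg (by omega), if_neg (by omega)]
  · rintro ⟨hnm, hp1, hg1, hg2, hdrop⟩
    have hpn : pvLcp u b < u.length := by omega
    refine ⟨hnm, pvLcp u b, by omega, ?_⟩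
    apply List.ext_getElem?
    intro j
    rw [pv_getElem?_swapAt b (pvLcp u b) _ _ (by omega) j]
    split_ifs with h1 h2 h3
    · exact (pvLcp_agree u b j h1).symm
    · rw [h2, pv_getD_of_lt u (pvLcp u b) 'a' hpn, hg1]
    · rw [h3, pv_getD_of_lt u (pvLcp u b + 1) 'a' (by omega), hg2]
    · have h4 := (pv_drop_eq_iff u b (pvLcp u b + 2) (pvLcp u b + 2)).mp hdrop (j - pvLcp u b - 2)
      rw [show pvLcp u b + 2 + (j - pvLcp u b - 2) = j by omega] at h4
      exact h4.symm

theorem pv_e9 (u b : List Char) :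
    ((u.length : Int) = (b.length : Int) - 1 ∧ ∃ i < b.length, b.take i ++ b.drop (i+1) = u) ↔
    ((u.length : Int) = (b.length : Int) - 1 ∧ u.drop (pvLcp u b) = b.drop (pvLcp u b + 1)) := by
  constructor
  · rintro ⟨hlen, i, him, heq⟩
    have hm : b.length = u.length + 1 := by omega
    have hjs : ∀ j, u[j]? = (if j < i then b[j]? else b[j+1]?) := by
      intro j
      rw [← heq, pv_getElem?_removeAt b i (by omega) j]
    have hip : i ≤ pvLcp u b :=
      le_pvLcp_of_agree u b i (by omega) (fun j hj => by rw [hjs j, if_pos hj])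
    refine ⟨hlen, ?_⟩
    rw [pv_drop_eq_iff]
    intro k
    rw [hjs (pvLcp u b + k), if_neg (by omega)]
    congr 1
    omega
  · rintro ⟨hlen, hdrop⟩
    have hm : b.length = u.length + 1 := by omega
    have hpn : pvLcp u b ≤ u.length := pvLcp_le_left u b
    refine ⟨hlen, pvLcp u b, by omega, ?_⟩
    apply List.ext_getElem?
    intro j
    rw [pv_getElem?_removeAt b (pvLcp u b) (by omega) j]
    split_ifs with h1
    · exact (pvLcp_agree u b j h1).symm
    · have h4 := (pv_drop_eq_iff u b (pvLcp u b) (pvLcp u b + 1)).mp hdrop (j - pvLcp u b)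
      rw [show pvLcp u b + (j - pvLcp u b) = j by omega,
        show pvLcp u b + 1 + (j - pvLcp u b) = j + 1 by omega] at h4
      exact h4.symm

theorem pv_core_eq (u b : List Char) : pvCoreA u b = pvCoreB u b := by
  unfold pvCoreA pvCoreB
  by_cases h1 : u = b
  · rw [if_pos h1, if_pos ((pv_e1 u b).mp h1)]
  · have hne := h1
    rw [if_neg h1, if_neg (fun h => h1 ((pv_e1 u b).mpr h))]
    simp only [pv_e2 u b, pv_e3 u b, pv_e4 u b hne, pv_e7 u b hne, pv_e8 u b hne, pv_e9 u b]
    by_cases h5 : (u.length = b.length + 1 ∧ (PySem.Chars.startswith u b || PySem.Chars.endswith u b) = true)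
    · rw [if_pos h5, if_pos h5]
    · rw [if_neg h5, if_neg h5]
      simp only [pv_e6 u b h5]

-- ===== VERDICT (by name: the statement is the Claim_ definition above) =====
theorem determine_shape_for_db_spec : Claim_equal_determine_shape_for_db := by
  unfold Claim_equal_determine_shape_for_db Spec_determine_shape_for_db
    determine_shape_for_db determine_shape_for_db_alt
  intro username based_on _
  by_cases h : based_on = "" ∨ username = ""
  · rw [if_pos h, if_pos h]
  · rw [if_neg h, if_neg h]
    exact pv_core_eq _ _
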